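-- pv_equiv track=rewrite | github.com/12vishalkumar/Summing-Pieces-of-array | ptc.py | summingPieces
-- ===== SOURCE A (Python) =====
-- def summingPieces(arr):
--     # Write your code here
--     mod = 10**9+7
--     if(len(arr) == 1):
--         return arr[0]
--     else:
--         sum_arr = [0 for i in range(len(arr))]
--         sum_arr[0] = arr[0]
--         for i in range(1, len(arr)):
--             sum_arr[i] = (sum_arr[i-1] + (pow(2, i, mod)*arr[i])%mod)%mod
--         sum_1 = arr[0]
--         for n in range(1, len(arr)):
--             sum_1 = ( 2*sum_1 + ( (pow(2, n+1, mod)-1)*arr[n] )%mod + sum_arr[n-1] )%mod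
--     return sum_1
-- ===== SOURCE B (Python) =====
-- def summingPieces(arr):
--     mod = 10**9 + 7
--     if len(arr) == 1:
--         return arr[0]
--     n = len(arr)
--     total = arr[0] * (pow(2, n, mod) - 1)
--     for i in range(1, n):
--         total += arr[i] * (pow(2, n, mod) + pow(2, n - 1, mod)
--                            - pow(2, n - 1 - i, mod) - pow(2, i, mod))
--     return total % mod
-- ===== Notes on version B (the rewrite author's own statement) =====
-- stated objective: simpler
-- what changed: Replaces A's auxiliary prefix array plus sequential doubling recurrence by one loop that multiplies each element by its closed-form coefficient 2^n + 2^(n-1) - 2^(n-1-i) - 2^i and takes a single final mod.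
import Mathlib
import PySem

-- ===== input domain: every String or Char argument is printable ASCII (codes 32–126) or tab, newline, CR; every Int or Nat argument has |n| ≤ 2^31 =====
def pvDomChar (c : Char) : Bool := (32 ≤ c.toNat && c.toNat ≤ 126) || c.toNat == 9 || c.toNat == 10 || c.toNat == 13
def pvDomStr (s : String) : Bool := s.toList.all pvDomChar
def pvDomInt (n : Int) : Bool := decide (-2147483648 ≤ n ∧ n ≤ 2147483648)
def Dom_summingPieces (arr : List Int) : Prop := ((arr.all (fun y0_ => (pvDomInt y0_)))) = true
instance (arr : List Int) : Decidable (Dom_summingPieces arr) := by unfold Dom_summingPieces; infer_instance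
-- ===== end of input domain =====

-- B replaces A's prefix array + doubling recurrence by a single loop over closed-form
-- per-element coefficients (objective: simpler); equal on every non-empty list.

-- ===== PORT A =====
def summingPieces (arr : List Int) : Int :=
  let md : Int := 10 ^ 9 + 7
  if PySem.List.len arr = 1 then
    PySem.List.pyGetD arr 0 0
  else
    let sumArr0 : List Int := (PySem.List.pyRange 0 (PySem.List.len arr) 1).map (fun _ => (0 : Int))
    let sumArr1 := PySem.List.pySetD sumArr0 0 (PySem.List.pyGetD arr 0 0)
    let sumArr := (PySem.List.pyRange 1 (PySem.List.len arr) 1).foldl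
      (fun sa i => PySem.List.pySetD sa i
        (PySem.Int.mod (PySem.List.pyGetD sa (i - 1) 0 +
          PySem.Int.mod (PySem.Int.powMod 2 i.toNat md * PySem.List.pyGetD arr i 0) md) md)) sumArr1
    let sum1 := PySem.List.pyGetD arr 0 0
    (PySem.List.pyRange 1 (PySem.List.len arr) 1).foldl
      (fun s n => PySem.Int.mod (2 * s +
        PySem.Int.mod ((PySem.Int.powMod 2 (n + 1).toNat md - 1) * PySem.List.pyGetD arr n 0) md +
        PySem.List.pyGetD sumArr (n - 1) 0) md) sum1

-- ===== PORT B =====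
def summingPieces_alt (arr : List Int) : Int :=
  let md : Int := 10 ^ 9 + 7
  if PySem.List.len arr = 1 then
    PySem.List.pyGetD arr 0 0
  else
    let n := PySem.List.len arr
    let total0 := PySem.List.pyGetD arr 0 0 * (PySem.Int.powMod 2 n.toNat md - 1)
    let total := (PySem.List.pyRange 1 n 1).foldl
      (fun t i => t + PySem.List.pyGetD arr i 0 *
        (PySem.Int.powMod 2 n.toNat md + PySem.Int.powMod 2 (n - 1).toNat md -
         PySem.Int.powMod 2 (n - 1 - i).toNat md - PySem.Int.powMod 2 i.toNat md)) total0
    PySem.Int.mod total md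

-- ===== PRECONDITION & SPEC =====
-- Pre_ excludes only the empty list, on which A (and B) raise IndexError at the first-element access.
def Pre_summingPieces (arr : List Int) : Prop := arr ≠ []
instance (arr : List Int) : Decidable (Pre_summingPieces arr) := by unfold Pre_summingPieces; infer_instance
def pvWitness_summingPieces : List Int := [3, -5, 7]

def Spec_summingPieces (arr : List Int) (out : Int) : Prop := out = summingPieces_alt arr
instance (arr : List Int) (out : Int) : Decidable (Spec_summingPieces arr out) := by unfold Spec_summingPieces; infer_instance

-- ===== CLAIM (what is proved, stated in full; the proofs are below) =====
def Claim_equal_summingPieces : Prop := ∀ (arr : List Int), Dom_summingPieces arr → Pre_summingPieces arr → Spec_summingPieces arr (summingPieces arr)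

-- ===== LEMMAS AND PROOFS =====

-- the modulus
def pvP : Int := 10 ^ 9 + 7

-- arr[j] with Nat index (total form; all accesses below are in range)
def pvA (arr : List Int) (j : Nat) : Int := arr.getD j 0

-- value of A's sum_arr[k]
def pvPm (arr : List Int) : Nat → Int
  | 0 => pvA arr 0
  | k + 1 => PySem.Int.mod (pvPm arr k +
      PySem.Int.mod (PySem.Int.powMod 2 (k + 1) pvP * pvA arr (k + 1)) pvP) pvP

-- value of A's sum_1 after processing loop indices 1..k
def pvS (arr : List Int) : Nat → Int
  | 0 => pvA arr 0
  | k + 1 => PySem.Int.mod (2 * pvS arr k +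
      PySem.Int.mod ((PySem.Int.powMod 2 (k + 2) pvP - 1) * pvA arr (k + 1)) pvP +
      pvPm arr k) pvP

-- closed-form (un-reduced) coefficient of arr[i] for prefix length m
def pvC (m i : Nat) : Int := 2 ^ m + 2 ^ (m - 1) - 2 ^ (m - 1 - i) - 2 ^ i

lemma pvP_pos : (0 : Int) < pvP := by decide
lemma pv_powMod (e : Nat) : PySem.Int.powMod 2 e pvP = (2 ^ e : Int) % pvP := by
  simp [PySem.Int.powMod, PySem.Int.mod_eq_emod_of_pos pvP_pos]
lemma pv_emod_modeq (a : Int) : a % pvP ≡ a [ZMOD pvP] := Int.emod_emod_of_dvd a dvd_rfl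

lemma sum_map_range (n : ℕ) (f : ℕ → ℤ) : ((List.range n).map f).sum = ∑ i ∈ Finset.range n, f i := by
  induction n with
  | zero => simp
  | succ m ih => rw [List.range_succ, Finset.sum_range_succ, ← ih]; simp

lemma modeq_sum (s : Finset ℕ) (f g : ℕ → ℤ) (n : ℤ) (h : ∀ i ∈ s, f i ≡ g i [ZMOD n]) :
    (∑ i ∈ s, f i) ≡ ∑ i ∈ s, g i [ZMOD n] := by
  classical
  induction s using Finset.induction_on with
  | empty => simp
  | insert a s ha ih =>
    rw [Finset.sum_insert ha, Finset.sum_insert ha]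
    exact Int.ModEq.add (h a (Finset.mem_insert_self a s))
      (ih fun i hi => h i (Finset.mem_insert_of_mem hi))

lemma pvC_step {k i : Nat} (h : i ≤ k) : 2 * pvC (k + 1) i + 2 ^ i = pvC (k + 2) i := by
  have e1 : k + 1 - 1 = k := by omega
  have e2 : k + 2 - 1 = k + 1 := by omega
  have e3 : k + 1 - i = k - i + 1 := by omega
  simp only [pvC, e1, e2, e3]
  rw [pow_succ 2 (k - i), pow_succ 2 (k + 1), pow_succ 2 k]
  ring

lemma pvC_last (k : Nat) : pvC (k + 2) (k + 1) = 2 ^ (k + 2) - 1 := by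
  show 2 ^ (k + 2) + 2 ^ (k + 2 - 1) - 2 ^ (k + 2 - 1 - (k + 1)) - 2 ^ (k + 1) = _
  rw [show k + 2 - 1 - (k + 1) = 0 from by omega, show k + 2 - 1 = k + 1 from by omega, pow_zero]
  ring

lemma pvPm_modeq (arr : List Int) (k : Nat) :
    pvPm arr k ≡ ∑ i ∈ Finset.range (k + 1), pvA arr i * 2 ^ i [ZMOD pvP] := by
  induction k with
  | zero => simp [pvPm]
  | succ k ih =>
    rw [Finset.sum_range_succ]
    show PySem.Int.mod _ _ ≡ _ [ZMOD pvP]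
    rw [PySem.Int.mod_eq_emod_of_pos pvP_pos, PySem.Int.mod_eq_emod_of_pos pvP_pos, pv_powMod]
    calc (pvPm arr k + (2 ^ (k + 1) % pvP * pvA arr (k + 1)) % pvP) % pvP
        ≡ pvPm arr k + (2 ^ (k + 1) % pvP * pvA arr (k + 1)) % pvP [ZMOD pvP] := pv_emod_modeq _
      _ ≡ (∑ i ∈ Finset.range (k + 1), pvA arr i * 2 ^ i) + 2 ^ (k + 1) * pvA arr (k + 1) [ZMOD pvP] :=
          Int.ModEq.add ih ((pv_emod_modeq _).trans (Int.ModEq.mul (pv_emod_modeq _) (Int.ModEq.refl _)))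
      _ = (∑ i ∈ Finset.range (k + 1), pvA arr i * 2 ^ i) + pvA arr (k + 1) * 2 ^ (k + 1) := by ring

lemma pvS_modeq (arr : List Int) (k : Nat) :
    pvS arr k ≡ ∑ i ∈ Finset.range (k + 1), pvA arr i * pvC (k + 1) i [ZMOD pvP] := by
  induction k with
  | zero => simp [pvS, pvC]
  | succ k ih =>
    show PySem.Int.mod _ _ ≡ _ [ZMOD pvP]
    rw [PySem.Int.mod_eq_emod_of_pos pvP_pos, PySem.Int.mod_eq_emod_of_pos pvP_pos, pv_powMod]
    calc (2 * pvS arr k + ((2 ^ (k + 2) % pvP - 1) * pvA arr (k + 1)) % pvP + pvPm arr k) % pvP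
        ≡ 2 * pvS arr k + ((2 ^ (k + 2) % pvP - 1) * pvA arr (k + 1)) % pvP + pvPm arr k [ZMOD pvP] := pv_emod_modeq _
      _ ≡ 2 * (∑ i ∈ Finset.range (k + 1), pvA arr i * pvC (k + 1) i)
            + (2 ^ (k + 2) - 1) * pvA arr (k + 1)
            + ∑ i ∈ Finset.range (k + 1), pvA arr i * 2 ^ i [ZMOD pvP] := by
          refine Int.ModEq.add (Int.ModEq.add (Int.ModEq.mul (Int.ModEq.refl 2) ih) ?_) (pvPm_modeq arr k)
          exact (pv_emod_modeq _).trans (Int.ModEq.mul (Int.ModEq.sub (pv_emod_modeq _) (Int.ModEq.refl 1)) (Int.ModEq.refl _))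
      _ = (∑ i ∈ Finset.range (k + 1), pvA arr i * (2 * pvC (k + 1) i + 2 ^ i))
            + pvA arr (k + 1) * (2 ^ (k + 2) - 1) := by
          rw [Finset.mul_sum]
          have hs : ∑ i ∈ Finset.range (k + 1), pvA arr i * (2 * pvC (k + 1) i + 2 ^ i)
              = (∑ i ∈ Finset.range (k + 1), 2 * (pvA arr i * pvC (k + 1) i))
                + ∑ i ∈ Finset.range (k + 1), pvA arr i * 2 ^ i := by
            rw [← Finset.sum_add_distrib]
            exact Finset.sum_congr rfl fun i _ => by ring
          rw [hs]; ring
      _ = ∑ i ∈ Finset.range (k + 2), pvA arr i * pvC (k + 2) i := by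
          conv_rhs => rw [Finset.sum_range_succ, pvC_last k]
          congr 1
          exact Finset.sum_congr rfl fun i hi => by
            rw [pvC_step (Nat.lt_succ_iff.mp (Finset.mem_range.mp hi))]


lemma pvS_emod (arr : List Int) (k : Nat) : pvS arr (k + 1) % pvP = pvS arr (k + 1) := by
  simp [pvS, PySem.Int.mod_eq_emod_of_pos pvP_pos, Int.emod_emod_of_dvd _ (dvd_refl pvP)]

lemma set_map_range {N m : Nat} (f : Nat → Int) (v : Int) :
    ((List.range N).map f).set m v = (List.range N).map (fun j => if j = m then v else f j) := by
  apply List.ext_getElem <;> simp [List.getElem_set]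
  intro i hi
  split
  · simp_all
  · rw [if_neg (by omega)]

lemma getD_map_range' {N m : Nat} (f : Nat → Int) (d : Int) (hm : m < N) :
    ((List.range N).map f).getD m d = f m := by
  rw [List.getD_eq_getElem _ _ (by simpa using hm)]
  simp

lemma pySetD_zero' (xs : List Int) (v : Int) :
    PySem.List.pySetD xs (0 : Int) v = xs.set 0 v := by
  rw [PySem.List.pySetD_of_nonneg xs v (le_refl (0 : Int))]
  rfl

lemma pv_sumArr_eq (arr : List Int) (b : Int) (hb : b = (arr.length : Int)) (k : Nat) (hk : k + 1 ≤ arr.length) :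
    (PySem.List.pyRange 1 (1 + (k : Int)) 1).foldl
      (fun sa i => PySem.List.pySetD sa i
        (PySem.Int.mod (PySem.List.pyGetD sa (i - 1) 0 +
          PySem.Int.mod (PySem.Int.powMod 2 i.toNat pvP * PySem.List.pyGetD arr i 0) pvP) pvP))
      (PySem.List.pySetD ((PySem.List.pyRange 0 b 1).map (fun _ => (0 : Int))) 0
        (PySem.List.pyGetD arr 0 0))
    = (List.range arr.length).map (fun j => if j ≤ k then pvPm arr j else 0) := by
  induction k with
  | zero =>
    rw [show (1 : Int) + ((0 : Nat) : Int) = 1 from by norm_num,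
      PySem.List.pyRange_one_eq_nil (le_refl 1), List.foldl_nil]
    rw [hb, PySem.List.pyRange_one, List.map_map]
    have h0 : ((arr.length : Int) - 0).toNat = arr.length := by omega
    rw [h0, pySetD_zero', set_map_range]
    refine List.map_congr_left fun j hj => ?_
    rcases Nat.eq_zero_or_pos j with h | h
    · subst h; simp [pvPm, pvA, PySem.List.pyGetD_zero]
    · rw [if_neg (by omega), if_neg (by omega)]; rfl
  | succ k ih =>
    have hb : (1 : Int) + ((k : Nat) + 1 : Nat) = (1 + (k : Int)) + 1 := by push_cast; ring
    rw [hb, PySem.List.pyRange_one_succ_right (by omega), List.foldl_append, List.foldl_cons,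
      List.foldl_nil, ih (by omega)]
    have c1 : (1 : Int) + (k : Int) - 1 = ((k : Nat) : Int) := by omega
    have c2 : (1 : Int) + (k : Int) = ((k + 1 : Nat) : Int) := by push_cast; ring
    rw [c1, c2, PySem.List.pySetD_natCast, PySem.List.pyGetD_natCast, PySem.List.pyGetD_natCast,
      Int.toNat_natCast, getD_map_range' _ _ (by omega), if_pos (le_refl k), set_map_range]
    refine List.map_congr_left fun j hj => ?_
    by_cases hj1 : j = k + 1
    · subst hj1
      rw [if_pos rfl, if_pos (le_refl _)]
      simp [pvPm, pvA]
    · rw [if_neg hj1]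
      by_cases hj2 : j ≤ k
      · rw [if_pos hj2, if_pos (by omega)]
      · rw [if_neg hj2, if_neg (by omega)]

lemma pv_sum1_eq (arr : List Int) (L : List Int)
    (hL : ∀ j : Nat, j < arr.length → PySem.List.pyGetD L (j : Int) 0 = pvPm arr j)
    (k : Nat) (hk : k + 1 ≤ arr.length) :
    (PySem.List.pyRange 1 (1 + (k : Int)) 1).foldl
      (fun s n => PySem.Int.mod (2 * s +
        PySem.Int.mod ((PySem.Int.powMod 2 (n + 1).toNat pvP - 1) * PySem.List.pyGetD arr n 0) pvP +
        PySem.List.pyGetD L (n - 1) 0) pvP) (PySem.List.pyGetD arr 0 0)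
    = pvS arr k := by
  induction k with
  | zero =>
    rw [show (1 : Int) + ((0 : Nat) : Int) = 1 from by norm_num,
      PySem.List.pyRange_one_eq_nil (le_refl 1), List.foldl_nil, PySem.List.pyGetD_zero]
    simp [pvS, pvA]
  | succ k ih =>
    have hb : (1 : Int) + ((k : Nat) + 1 : Nat) = (1 + (k : Int)) + 1 := by push_cast; ring
    rw [hb, PySem.List.pyRange_one_succ_right (by omega), List.foldl_append, List.foldl_cons,
      List.foldl_nil, ih (by omega)]
    have c1 : (1 : Int) + (k : Int) - 1 = ((k : Nat) : Int) := by omega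
    have c3 : ((1 : Int) + (k : Int) + 1).toNat = k + 2 := by omega
    have c2 : (1 : Int) + (k : Int) = ((k + 1 : Nat) : Int) := by push_cast; ring
    rw [c1, c3, c2, PySem.List.pyGetD_natCast, hL k (by omega)]
    simp [pvS, pvA]

lemma pvC_zero {N : Nat} (hN : 1 ≤ N) : pvC N 0 = 2 ^ N - 1 := by
  have e : N - 1 - 0 = N - 1 := by omega
  simp only [pvC, e, pow_zero]
  ring

-- ===== VERDICT (by name: the statement is the Claim_ definition above) =====
theorem summingPieces_spec : Claim_equal_summingPieces := by
  intro arr _ hpre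
  unfold Spec_summingPieces summingPieces summingPieces_alt
  simp only []
  by_cases h1 : PySem.List.len arr = 1
  · rw [if_pos h1, if_pos h1]
  · rw [if_neg h1, if_neg h1]
    rw [show ((10 : Int) ^ 9 + 7) = pvP from rfl]
    have hlen : PySem.List.len arr = (arr.length : Int) := PySem.List.len_eq arr
    have hN2 : 2 ≤ arr.length := by
      rcases arr with _ | ⟨x, _ | ⟨y, t⟩⟩
      · exact absurd rfl hpre
      · exact absurd (by simp [PySem.List.len_eq]) h1
      · simp
    set N := arr.length with hNdef
    have hsplit : (N : Int) = 1 + ((N - 1 : Nat) : Int) := by omega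
    rw [hlen, hsplit]
    rw [pv_sumArr_eq arr _ (by omega) (N - 1) (by omega)]
    rw [pv_sum1_eq arr _ (fun j hj => by
        rw [PySem.List.pyGetD_natCast, getD_map_range' _ _ hj, if_pos (by omega)])
      (N - 1) (by omega)]
    -- B side
    rw [PySem.List.foldl_add (g := fun i => PySem.List.pyGetD arr i 0 *
        (PySem.Int.powMod 2 (1 + ((N - 1 : Nat) : Int)).toNat pvP +
         PySem.Int.powMod 2 (1 + ((N - 1 : Nat) : Int) - 1).toNat pvP -
         PySem.Int.powMod 2 (1 + ((N - 1 : Nat) : Int) - 1 - i).toNat pvP -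
         PySem.Int.powMod 2 i.toNat pvP))]
    rw [PySem.List.pyRange_one, List.map_map]
    have hcnt : ((1 + ((N - 1 : Nat) : Int)) - 1).toNat = N - 1 := by omega
    rw [hcnt, sum_map_range]
    rw [PySem.Int.mod_eq_emod_of_pos pvP_pos]
    -- both sides to the common congruence class
    have hmod : pvS arr (N - 1) ≡
        PySem.List.pyGetD arr 0 0 * (PySem.Int.powMod 2 (1 + ((N - 1 : Nat) : Int)).toNat pvP - 1) +
        ∑ i ∈ Finset.range (N - 1), (fun i => PySem.List.pyGetD arr i 0 *
          (PySem.Int.powMod 2 (1 + ((N - 1 : Nat) : Int)).toNat pvP +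
           PySem.Int.powMod 2 (1 + ((N - 1 : Nat) : Int) - 1).toNat pvP -
           PySem.Int.powMod 2 (1 + ((N - 1 : Nat) : Int) - 1 - i).toNat pvP -
           PySem.Int.powMod 2 i.toNat pvP)) ((1 : Int) + (i : Int)) [ZMOD pvP] := by
      have hS := pvS_modeq arr (N - 1)
      rw [show N - 1 + 1 = N from by omega] at hS
      refine hS.trans ?_
      rw [show N = (N - 1) + 1 from by omega, Finset.sum_range_succ']
      rw [show (N - 1) + 1 = N from by omega]
      have ht : (1 + ((N - 1 : Nat) : Int)).toNat = N := by omega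
      have ht1 : ((1 : Int) + ((N - 1 : Nat) : Int) - 1).toNat = N - 1 := by omega
      have hsum : (∑ i ∈ Finset.range (N - 1), pvA arr (i + 1) * pvC N (i + 1)) ≡
          ∑ i ∈ Finset.range (N - 1), (fun i => PySem.List.pyGetD arr i 0 *
            (PySem.Int.powMod 2 (1 + ((N - 1 : Nat) : Int)).toNat pvP +
             PySem.Int.powMod 2 (1 + ((N - 1 : Nat) : Int) - 1).toNat pvP -
             PySem.Int.powMod 2 (1 + ((N - 1 : Nat) : Int) - 1 - i).toNat pvP -
             PySem.Int.powMod 2 i.toNat pvP)) ((1 : Int) + (i : Int)) [ZMOD pvP] := by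
        refine modeq_sum _ _ _ _ fun i hi => ?_
        have hiN : i < N - 1 := Finset.mem_range.mp hi
        simp only []
        have e1 : (1 : Int) + (i : Int) = ((i + 1 : Nat) : Int) := by push_cast; ring
        have e2 : (1 : Int) + ((N - 1 : Nat) : Int) - 1 - ((i + 1 : Nat) : Int)
            = ((N - 1 - (i + 1) : Nat) : Int) := by omega
        rw [e1, e2, PySem.List.pyGetD_natCast, Int.toNat_natCast, Int.toNat_natCast, ht, ht1]
        have hc : pvC N (i + 1) = 2 ^ N + 2 ^ (N - 1) - 2 ^ (N - 1 - (i + 1)) - 2 ^ (i + 1) := rfl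
        rw [pv_powMod, pv_powMod, pv_powMod, pv_powMod]
        exact (Int.ModEq.mul (Int.ModEq.refl _)
          ((Int.ModEq.sub (Int.ModEq.sub (Int.ModEq.add (pv_emod_modeq _) (pv_emod_modeq _))
            (pv_emod_modeq _)) (pv_emod_modeq _)).trans (by rw [hc]))).symm
      have hzero : pvA arr 0 * pvC N 0 ≡
          PySem.List.pyGetD arr 0 0 * (PySem.Int.powMod 2 (1 + ((N - 1 : Nat) : Int)).toNat pvP - 1)
          [ZMOD pvP] := by
        rw [PySem.List.pyGetD_zero, ht, pv_powMod, pvC_zero (by omega)]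
        exact Int.ModEq.mul (Int.ModEq.refl _)
          (Int.ModEq.sub (pv_emod_modeq _) (Int.ModEq.refl 1)).symm
      exact (Int.ModEq.add hsum hzero).trans (by rw [add_comm])
    have heq : pvS arr (N - 1) % pvP = _ % pvP := hmod
    have ht1' : ((1 : Int) + ((N - 1 : Nat) : Int) - 1).toNat = N - 1 := by omega
    have hSS := pvS_emod arr (N - 2)
    rw [show N - 2 + 1 = N - 1 from by omega] at hSS
    simp only [Function.comp_apply]
    beta_reduce at heq ⊢
    rw [ht1'] at heq
    exact hSS.symm.trans heq
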